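-- pv_equiv track=rewrite | github.com/djarufes/ECE404-1 | HW5/hw05.py | gen_S
-- ===== SOURCE A (Python) =====
-- def gen_S(key):
--     s = [i for i in range(256)]
--     t = []
--     #k = [0] * len(key)
--     #for i in range(len(key)):
--     #    k[i] = int(BitVector(textstring=key[i]))
--     #while (len(t) < 256):
--     #    t.extend(k)
--     for i in range(256):
--         t.append(ord(key[i % (len(key))]))
--     j = 0
--     for i in range(256):
--         j = (j + s[i] + t[i]) % 256
--         s[i], s[j] = s[j], s[i]
--     return s
-- ===== SOURCE B (Python) =====
-- def gen_S(key):
--     n = len(key)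
--
--     def ksa(i, j, d):
--         if i == 256:
--             return d
--         a = d.get(i, i)
--         j = (j + a + ord(key[i % n])) % 256
--         b = d.get(j, j)
--         d[i] = b
--         d[j] = a
--         return ksa(i + 1, j, d)
--
--     d = ksa(0, 0, {})
--     return [d.get(i, i) for i in range(256)]
-- ===== Notes on version B (the rewrite author's own statement) =====
-- stated objective: alternative
-- what changed: B replaces A's dense 256-list with in-place swaps and a separately built 256-entry key table by a tail-recursive pass that records the permutation sparsely in a dict (missing key = identity), computes each key byte inline, and materializes the list once at the end.
import Mathlib
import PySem

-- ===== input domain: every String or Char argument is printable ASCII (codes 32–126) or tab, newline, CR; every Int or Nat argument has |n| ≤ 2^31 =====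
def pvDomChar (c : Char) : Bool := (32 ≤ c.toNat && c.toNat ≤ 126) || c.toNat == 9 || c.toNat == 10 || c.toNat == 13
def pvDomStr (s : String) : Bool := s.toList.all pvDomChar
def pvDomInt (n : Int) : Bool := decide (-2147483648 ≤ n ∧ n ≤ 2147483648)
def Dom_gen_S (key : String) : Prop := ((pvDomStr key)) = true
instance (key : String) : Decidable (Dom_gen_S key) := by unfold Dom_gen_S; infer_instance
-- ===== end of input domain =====

-- B builds the permutation sparsely in a dict (missing key = identity) by tail recursion,
-- with the key byte computed inline, and materializes the 256-list once at the end
-- (objective: alternative data structure / decomposition, same cost).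

-- ===== PORT A =====
def gen_S (key : String) : List Int :=
  -- s = [i for i in range(256)]
  let s : List Int := (PySem.List.pyRange 0 256 1).map (fun i => i)
  -- t = []; for i in range(256): t.append(ord(key[i % len(key)]))
  let t : List Int := (PySem.List.pyRange 0 256 1).foldl
    (fun t i =>
      t ++ [(((PySem.Str.pyGet? key (PySem.Int.mod i (PySem.Str.len key))).getD (Char.ofNat 0)).toNat : Int)])
    []
  -- j = 0; for i in range(256): j = (j + s[i] + t[i]) % 256; s[i], s[j] = s[j], s[i]
  let res := (PySem.List.pyRange 0 256 1).foldl
    (fun (sj : List Int × Int) i =>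
      let s := sj.1
      let j := PySem.Int.mod (sj.2 + PySem.List.pyGetD s i 0 + PySem.List.pyGetD t i 0) 256
      ((s.set i.toNat (PySem.List.pyGetD s j 0)).set j.toNat (PySem.List.pyGetD s i 0), j))
    (s, 0)
  res.1

-- ===== PORT B =====
-- def ksa(i, j, d): if i == 256: return d; a = d.get(i,i); j = (j+a+ord(key[i%n]))%256;
--   b = d.get(j,j); d[i] = b; d[j] = a; return ksa(i+1, j, d)
-- (fuel = 256 - i only makes the recursion structural; the steps are Source B's)
def ksaRec (key : String) (n : Int) (fuel : Nat) (i j : Int) (d : PySem.Dict Int Int) : PySem.Dict Int Int :=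
  match fuel with
  | 0 => d
  | f + 1 =>
    let a := d.getD i i
    let j2 := PySem.Int.mod (j + a + (((PySem.Str.pyGet? key (PySem.Int.mod i n)).getD (Char.ofNat 0)).toNat : Int)) 256
    let b := d.getD j2 j2
    ksaRec key n f (i + 1) j2 ((d.insert i b).insert j2 a)

def gen_S_alt (key : String) : List Int :=
  let d := ksaRec key (PySem.Str.len key) 256 0 0 PySem.Dict.empty
  -- return [d.get(i, i) for i in range(256)]
  (PySem.List.pyRange 0 256 1).map (fun i => d.getD i i)

-- ===== PRECONDITION & SPEC =====
-- Pre_ excludes only the empty key, on which both Pythons raise ZeroDivisionError (i % len(key)).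
def Pre_gen_S (key : String) : Prop := key ≠ ""
instance (key : String) : Decidable (Pre_gen_S key) := by unfold Pre_gen_S; infer_instance
def pvWitness_gen_S : String := "key"

def Spec_gen_S (key : String) (out : List Int) : Prop := out = gen_S_alt key
instance (key : String) (out : List Int) : Decidable (Spec_gen_S key out) := by unfold Spec_gen_S; infer_instance

-- ===== CLAIM (what is proved, stated in full; the proofs are below) =====
def Claim_equal_gen_S : Prop := ∀ (key : String), Dom_gen_S key → Pre_gen_S key → Spec_gen_S key (gen_S key)

-- ===== LEMMAS AND PROOFS =====

-- appending one element per step is a map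
lemma foldl_append_map {α β : Type} (f : α → β) :
    ∀ (l : List α) (acc : List β),
      l.foldl (fun t i => t ++ [f i]) acc = acc ++ l.map f
  | [], acc => by simp
  | x :: l, acc => by
    simp [List.foldl, foldl_append_map f l]

lemma mod256_bounds (a : Int) : 0 ≤ PySem.Int.mod a 256 ∧ PySem.Int.mod a 256 < 256 := by
  rw [PySem.Int.mod_eq_emod_of_pos (by norm_num)]
  constructor
  · exact Int.emod_nonneg a (by norm_num)
  · exact Int.emod_lt_of_pos a (by norm_num)

-- A's key-byte table entry k is the inline key byte B computes at step k
lemma tGet_eq (key : String) (k : Nat) (hklt : k < 256) :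
    PySem.List.pyGetD
      ((PySem.List.pyRange 0 256 1).foldl
        (fun t i =>
          t ++ [(((PySem.Str.pyGet? key (PySem.Int.mod i (PySem.Str.len key))).getD (Char.ofNat 0)).toNat : Int)])
        []) (k : Int) 0
      = (((PySem.Str.pyGet? key (PySem.Int.mod (k : Int) (PySem.Str.len key))).getD (Char.ofNat 0)).toNat : Int) := by
  rw [foldl_append_map, List.nil_append]
  rw [show ((256 : Int)) = ((256 : Nat) : Int) by norm_num]
  rw [PySem.List.pyGetD_map_pyRange _ 256 k 0 hklt]

-- A's swap loop keeps the list at length 256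
lemma fold_length (t : List Int) :
    ∀ (l : List Int) (s : List Int) (j : Int),
      ((l.foldl
        (fun (sj : List Int × Int) i =>
          let s := sj.1
          let j := PySem.Int.mod (sj.2 + PySem.List.pyGetD s i 0 + PySem.List.pyGetD t i 0) 256
          ((s.set i.toNat (PySem.List.pyGetD s j 0)).set j.toNat (PySem.List.pyGetD s i 0), j))
        (s, j)).1).length = s.length
  | [], s, j => rfl
  | x :: l, s, j => by
    rw [List.foldl_cons, fold_length t l]
    simp

-- the core invariant: B's sparse dict (missing key = identity) tracks A's dense list pointwise
lemma loop_eq (key : String) (t : List Int)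
    (ht : ∀ k : Nat, k < 256 → PySem.List.pyGetD t (k : Int) 0
        = (((PySem.Str.pyGet? key (PySem.Int.mod (k : Int) (PySem.Str.len key))).getD (Char.ofNat 0)).toNat : Int)) :
    ∀ (m a : Nat), a + m = 256 → ∀ (s : List Int) (j : Int) (d : PySem.Dict Int Int),
      s.length = 256 →
      (∀ x : Int, 0 ≤ x → x < 256 → d.getD x x = PySem.List.pyGetD s x 0) →
      ∀ x : Int, 0 ≤ x → x < 256 →
        (ksaRec key (PySem.Str.len key) m (a : Int) j d).getD x x
          = PySem.List.pyGetD
              ((PySem.List.pyRange (a : Int) 256 1).foldl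
                (fun (sj : List Int × Int) i =>
                  let s := sj.1
                  let j := PySem.Int.mod (sj.2 + PySem.List.pyGetD s i 0 + PySem.List.pyGetD t i 0) 256
                  ((s.set i.toNat (PySem.List.pyGetD s j 0)).set j.toNat (PySem.List.pyGetD s i 0), j))
                (s, j)).1 x 0 := by
  intro m
  induction m with
  | zero =>
    intro a ha s j d _ hinv x hx0 hx1
    have h256 : ((256 : Int)) ≤ (a : Int) := by omega
    rw [PySem.List.pyRange_one_eq_nil h256]
    simpa [ksaRec] using hinv x hx0 hx1
  | succ m ih =>
    intro a ha s j d hlen hinv x hx0 hx1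
    have halt : (a : Int) < 256 := by omega
    rw [PySem.List.pyRange_one_cons halt, List.foldl_cons]
    -- A's step
    have ha0 : (0 : Int) ≤ (a : Int) := by positivity
    have haval : d.getD (a : Int) (a : Int) = PySem.List.pyGetD s (a : Int) 0 :=
      hinv (a : Int) ha0 halt
    set j' := PySem.Int.mod (j + PySem.List.pyGetD s (a : Int) 0 + PySem.List.pyGetD t (a : Int) 0) 256 with hj'def
    have hjb := mod256_bounds (j + PySem.List.pyGetD s (a : Int) 0 + PySem.List.pyGetD t (a : Int) 0)
    have hj0 : (0 : Int) ≤ j' := hjb.1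
    have hj1 : j' < 256 := hjb.2
    have hbval : d.getD j' j' = PySem.List.pyGetD s j' 0 := hinv j' hj0 hj1
    -- B's step computes the same j
    have hjB : PySem.Int.mod (j + d.getD (a : Int) (a : Int)
          + (((PySem.Str.pyGet? key (PySem.Int.mod (a : Int) (PySem.Str.len key))).getD (Char.ofNat 0)).toNat : Int)) 256
        = j' := by
      rw [haval, hj'def, ht a (by omega)]
    -- unfold one step of B
    show (ksaRec key (PySem.Str.len key) (m + 1) (a : Int) j d).getD x x = _
    rw [ksaRec]
    simp only [hjB]
    set s' : List Int :=
      (s.set (a : Int).toNat (PySem.List.pyGetD s j' 0)).set j'.toNat (PySem.List.pyGetD s (a : Int) 0)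
      with hs'def
    have hlen' : s'.length = 256 := by simp [hs'def, hlen]
    have hcast : ((a : Int) + 1) = ((a + 1 : Nat) : Int) := by push_cast; ring
    rw [hcast]
    refine ih (a + 1) (by omega) s' j' _ hlen' ?_ x hx0 hx1
    -- the invariant is preserved
    intro y hy0 hy1
    rw [PySem.Dict.getD_insert, PySem.Dict.getD_insert]
    have hyget : PySem.List.pyGetD s' y 0 = s'.getD y.toNat 0 :=
      PySem.List.pyGetD_of_nonneg s' 0 hy0
    by_cases hyj : y = j'
    · subst hyj
      rw [if_pos rfl, hyget, hs'def]
      rw [haval]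
      have hlt : j'.toNat < ((s.set (a : Int).toNat (PySem.List.pyGetD s j' 0))).length := by
        rw [List.length_set, hlen]; omega
      rw [List.getD_eq_getElem?_getD, List.getElem?_set_eq_of_lt _ hlt]
      rfl
    · rw [if_neg hyj]
      by_cases hya : y = (a : Int)
      · subst hya
        rw [if_pos rfl, hbval, hyget, hs'def]
        have hne : j'.toNat ≠ (a : Int).toNat := by
          intro h; apply hyj; omega
        have hlt : (a : Int).toNat < s.length := by
          rw [Int.toNat_natCast, hlen]; omega
        rw [List.getD_eq_getElem?_getD, List.getElem?_set_ne hne,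
          List.getElem?_set_eq_of_lt _ hlt]
        rfl
      · rw [if_neg hya, hinv y hy0 hy1, hyget, hs'def]
        have hne1 : j'.toNat ≠ y.toNat := by intro h; apply hyj; omega
        have hne2 : (a : Int).toNat ≠ y.toNat := by intro h; apply hya; omega
        rw [PySem.List.pyGetD_of_nonneg s 0 hy0]
        simp only [List.getD_eq_getElem?_getD]
        rw [List.getElem?_set_ne hne1, List.getElem?_set_ne hne2]

-- reading a length-256 list back out index by index reproduces it
lemma map_pyGetD_eq (s : List Int) (hlen : s.length = 256) :
    (PySem.List.pyRange 0 256 1).map (fun i => PySem.List.pyGetD s i 0) = s := by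
  rw [show ((256 : Int)) = ((0 : Int) + ((256 : Nat) : Int)) by norm_num, PySem.List.pyRange_one]
  apply List.ext_getElem
  · simp [hlen]
  · intro k hk1 hk2
    simp only [List.getElem_map, List.getElem_range]
    rw [show (0 : Int) + (k : Int) = ((k : Nat) : Int) by ring,
      PySem.List.pyGetD_of_nonneg s 0 (by positivity), Int.toNat_natCast]
    rw [List.getD_eq_getElem?_getD, List.getElem?_eq_getElem hk2]
    rfl

-- ===== VERDICT (by name: the statement is the Claim_ definition above) =====
theorem gen_S_spec : Claim_equal_gen_S := by
  intro key _ _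
  unfold Spec_gen_S gen_S gen_S_alt
  set t : List Int := (PySem.List.pyRange 0 256 1).foldl
    (fun t i =>
      t ++ [(((PySem.Str.pyGet? key (PySem.Int.mod i (PySem.Str.len key))).getD (Char.ofNat 0)).toNat : Int)])
    [] with htdef
  set s0 : List Int := (PySem.List.pyRange 0 256 1).map (fun i => i) with hs0def
  have hlen0 : s0.length = 256 := by
    simp [hs0def, PySem.List.length_pyRange_one]
  have hinv0 : ∀ x : Int, 0 ≤ x → x < 256 →
      (PySem.Dict.empty : PySem.Dict Int Int).getD x x = PySem.List.pyGetD s0 x 0 := by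
    intro x hx0 hx1
    rw [hs0def, PySem.List.pyGetD_map_pyRange_of_nonneg _ 256 x 0 hx0 hx1]
    simp [PySem.Dict.getD, PySem.Dict.get?, PySem.Dict.empty]
  set sfin := ((PySem.List.pyRange 0 256 1).foldl
      (fun (sj : List Int × Int) i =>
        let s := sj.1
        let j := PySem.Int.mod (sj.2 + PySem.List.pyGetD s i 0 + PySem.List.pyGetD t i 0) 256
        ((s.set i.toNat (PySem.List.pyGetD s j 0)).set j.toNat (PySem.List.pyGetD s i 0), j))
      (s0, 0)).1 with hsfin
  have hlenf : sfin.length = 256 := by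
    rw [hsfin, fold_length, hlen0]
  have hmain := loop_eq key t (fun k hk => tGet_eq key k hk) 256 0 rfl s0 0
    PySem.Dict.empty hlen0 hinv0
  have hmap : (PySem.List.pyRange 0 256 1).map
      (fun i => (ksaRec key (PySem.Str.len key) 256 0 0 PySem.Dict.empty).getD i i)
      = (PySem.List.pyRange 0 256 1).map (fun i => PySem.List.pyGetD sfin i 0) := by
    apply List.map_congr_left
    intro i hi
    rw [PySem.List.mem_pyRange_one] at hi
    have := hmain i hi.1 hi.2
    simpa [hsfin] using this
  calc sfin = (PySem.List.pyRange 0 256 1).map (fun i => PySem.List.pyGetD sfin i 0) :=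
        (map_pyGetD_eq sfin hlenf).symm
    _ = _ := hmap.symm
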